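-- pv_equiv track=rewrite | github.com/woojerry/Algorithms | Others/4기/1.py | solution
-- ===== SOURCE A (Python) =====
-- def solution(arr):
--     answer = [0] * 3
--     storage = [0] * 3
--     dic = {}
--
--     for i in arr:
--         if i == 1:
--             storage[0] += 1
--         elif i == 2:
--             storage[1] += 1
--         elif i == 3:
--             storage[2] += 1
--
--     pivot = max(storage)
--
--     for j in range(len(storage)):
--         if storage[j] != pivot:
--             insert = pivot - storage[j]
--             answer[j] = insert
--
--     return answer
-- ===== SOURCE B (Python) =====
-- def solution(arr):
--     s = sorted(arr)
--
--     def below(t):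
--         # number of elements of s strictly less than t, by binary search
--         lo, hi = 0, len(s)
--         while lo < hi:
--             mid = (lo + hi) // 2
--             if s[mid] < t:
--                 lo = mid + 1
--             else:
--                 hi = mid
--         return lo
--
--     storage = [below(v + 1) - below(v) for v in (1, 2, 3)]
--     pivot = max(storage)
--     return [pivot - c for c in storage]
-- ===== Notes on version B (the rewrite author's own statement) =====
-- stated objective: alternative
-- what changed: B sorts the array and obtains each of the three counts as below(v+1)-below(v) via a hand-written binary search over the sorted copy, instead of A's single per-element branching tally loop plus a conditional fill-in loop.
import Mathlib
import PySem

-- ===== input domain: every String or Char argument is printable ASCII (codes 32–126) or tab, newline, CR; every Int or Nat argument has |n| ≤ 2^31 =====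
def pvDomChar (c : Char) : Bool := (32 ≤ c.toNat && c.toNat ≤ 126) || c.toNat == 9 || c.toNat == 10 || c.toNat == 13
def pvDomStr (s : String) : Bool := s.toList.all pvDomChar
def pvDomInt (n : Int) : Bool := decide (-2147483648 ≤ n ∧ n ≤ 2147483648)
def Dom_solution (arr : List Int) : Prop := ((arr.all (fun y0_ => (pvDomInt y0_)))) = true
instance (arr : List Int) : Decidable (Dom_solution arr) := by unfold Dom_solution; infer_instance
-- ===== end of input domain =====

-- B replaces A's single branching tally loop by sorting the array and reading each count off a
-- hand-written binary search over the sorted copy (alternative algorithm; same return value).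

-- ===== PORT A =====
-- one pass over arr, branching per element, accumulating the three counters of storage
def solution (arr : List Int) : List Int :=
  let storage : Int × Int × Int := arr.foldl (fun s i =>
      if i == 1 then (s.1 + 1, s.2.1, s.2.2)
      else if i == 2 then (s.1, s.2.1 + 1, s.2.2)
      else if i == 3 then (s.1, s.2.1, s.2.2 + 1)
      else s) (0, 0, 0)
  let st : List Int := [storage.1, storage.2.1, storage.2.2]
  let pivot : Int := ((PySem.List.max? st (fun x => x)).getD 0)
  -- for j in range(len(storage)): if storage[j] != pivot: answer[j] = pivot - storage[j]
  (PySem.List.pyRange 0 3 1).foldl (fun answer j =>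
      match PySem.List.pyGet? st j with
      | some sj => if sj ≠ pivot then answer.set j.toNat (pivot - sj) else answer
      | none => answer) [0, 0, 0]

-- ===== PORT B =====
-- Python's `while lo < hi` binary-search loop of Source B's `below`; lo, hi stay in [0, len(s)],
-- so Nat carries them faithfully and `//2` on nonnegatives is Nat division; every s[mid] access
-- has 0 ≤ mid < len(s), where List.getD equals Python indexing.
def belowAux (s : List Int) (t : Int) (lo hi : Nat) : Nat :=
  if _h : lo < hi then
    let mid := (lo + hi) / 2
    if s.getD mid 0 < t then belowAux s t (mid + 1) hi
    else belowAux s t lo mid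
  else lo
termination_by hi - lo
decreasing_by all_goals omega

def solution_alt (arr : List Int) : List Int :=
  let s : List Int := PySem.List.sorted arr (fun x => x) false
  -- storage = [below(v+1) - below(v) for v in (1, 2, 3)]
  let storage : List Int :=
    [(1 : Int), 2, 3].map (fun v =>
      ((belowAux s (v + 1) 0 s.length : Int) - (belowAux s v 0 s.length : Int)))
  let pivot : Int := ((PySem.List.max? storage (fun x => x)).getD 0)
  storage.map (fun c => pivot - c)

-- ===== PRECONDITION & SPEC =====
def Spec_solution (arr : List Int) (out : List Int) : Prop := out = solution_alt arr
instance (arr : List Int) (out : List Int) : Decidable (Spec_solution arr out) := by unfold Spec_solution; infer_instance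

-- ===== CLAIM (what is proved, stated in full; the proofs are below) =====
def Claim_equal_solution : Prop := ∀ (arr : List Int), Dom_solution arr → Spec_solution arr (solution arr)

-- ===== LEMMAS AND PROOFS =====

-- A's classification fold computes the three element counts.
lemma fold_counts (arr : List Int) (a b c : Int) :
    arr.foldl (fun s i =>
      if i == 1 then (s.1 + 1, s.2.1, s.2.2)
      else if i == 2 then (s.1, s.2.1 + 1, s.2.2)
      else if i == 3 then (s.1, s.2.1, s.2.2 + 1)
      else s) ((a, b, c) : Int × Int × Int)
    = (a + arr.count 1, b + arr.count 2, c + arr.count 3) := by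
  induction arr generalizing a b c with
  | nil => simp
  | cons x t ih =>
    simp only [List.foldl_cons]
    rcases eq_or_ne x 1 with h1 | h1
    · subst h1
      rw [show (if ((1 : Int) == 1) = true then ((a : Int) + 1, b, c)
            else if ((1 : Int) == 2) = true then (a, b + 1, c)
            else if ((1 : Int) == 3) = true then (a, b, c + 1)
            else (a, b, c)) = (a + 1, b, c) from by norm_num, ih]
      simp only [List.count_cons, Prod.mk.injEq]
      refine ⟨?_, ?_, ?_⟩ <;> simp <;> push_cast <;> ring
    rcases eq_or_ne x 2 with h2 | h2
    · subst h2
      rw [show (if ((2 : Int) == 1) = true then ((a : Int) + 1, b, c)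
            else if ((2 : Int) == 2) = true then (a, b + 1, c)
            else if ((2 : Int) == 3) = true then (a, b, c + 1)
            else (a, b, c)) = (a, b + 1, c) from by norm_num, ih]
      simp only [List.count_cons, Prod.mk.injEq]
      refine ⟨?_, ?_, ?_⟩ <;> simp <;> push_cast <;> ring
    rcases eq_or_ne x 3 with h3 | h3
    · subst h3
      rw [show (if ((3 : Int) == 1) = true then ((a : Int) + 1, b, c)
            else if ((3 : Int) == 2) = true then (a, b + 1, c)
            else if ((3 : Int) == 3) = true then (a, b, c + 1)
            else (a, b, c)) = (a, b, c + 1) from by norm_num, ih]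
      simp only [List.count_cons, Prod.mk.injEq]
      refine ⟨?_, ?_, ?_⟩ <;> simp <;> push_cast <;> ring
    · rw [show (if ((x : Int) == 1) = true then ((a : Int) + 1, b, c)
            else if ((x : Int) == 2) = true then (a, b + 1, c)
            else if ((x : Int) == 3) = true then (a, b, c + 1)
            else (a, b, c)) = (a, b, c) from by simp [h1, h2, h3], ih]
      simp [h1, h2, h3]

-- The answer-filling fold over [0,1,2] equals [p-x, p-y, p-z].
lemma fill_eq (x y z p : Int) :
    (PySem.List.pyRange 0 3 1).foldl (fun answer j =>
      match PySem.List.pyGet? [x, y, z] j with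
      | some sj => if sj ≠ p then answer.set j.toNat (p - sj) else answer
      | none => answer) [0, 0, 0]
    = [p - x, p - y, p - z] := by
  have hr : PySem.List.pyRange 0 3 1 = [0, 1, 2] := by decide
  rw [hr]
  simp only [List.foldl_cons, List.foldl_nil]
  by_cases hx : x = p <;> by_cases hy : y = p <;> by_cases hz : z = p <;>
    simp [PySem.List.pyGet?, PySem.List.pyIdx?, hx, hy, hz, List.set]

-- In a sorted list, the elements < t form exactly the prefix of length countP (· < t).
lemma prefix_lt (s : List Int) (t : Int) (hs : s.Pairwise (· ≤ ·)) :
    ∀ (i : Nat) (hi : i < s.length),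
      (s[i] < t ↔ i < s.countP (fun x => decide (x < t))) := by
  induction s with
  | nil => intro i hi; simp at hi
  | cons a tail ih =>
    rcases List.pairwise_cons.mp hs with ⟨hhead, htail⟩
    intro i hi
    by_cases ha : a < t
    · cases i with
      | zero => simpa [List.countP_cons, ha] using Nat.succ_pos _
      | succ j =>
        have hj : j < tail.length := by simpa using hi
        have := ih htail j hj
        simp only [List.getElem_cons_succ, List.countP_cons, ha]
        simpa [Nat.succ_lt_succ_iff] using this
    · have hz : tail.countP (fun x => decide (x < t)) = 0 := by
        apply List.countP_eq_zero.mpr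
        intro x hx
        have : a ≤ x := hhead x hx
        simp only [decide_eq_true_eq]
        omega
      cases i with
      | zero => simp [List.countP_cons, ha, hz]
      | succ j =>
        have hj : j < tail.length := by simpa using hi
        have hle : a ≤ tail[j] := hhead _ (List.getElem_mem hj)
        have hz2 : (a :: tail).countP (fun x => decide (x < t)) = 0 := by
          simp [List.countP_cons, ha, hz]
        rw [hz2]
        simp only [List.getElem_cons_succ]
        constructor
        · intro h; omega
        · intro h; omega

-- The binary-search loop returns countP (· < t) on a sorted list.
lemma belowAux_eq (s : List Int) (t : Int) (hs : s.Pairwise (· ≤ ·)) :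
    ∀ (n lo hi : Nat), hi - lo ≤ n → hi ≤ s.length →
      lo ≤ s.countP (fun x => decide (x < t)) →
      s.countP (fun x => decide (x < t)) ≤ hi →
      belowAux s t lo hi = s.countP (fun x => decide (x < t)) := by
  intro n
  induction n with
  | zero =>
    intro lo hi h0 _ hlo hhi
    rw [belowAux]
    have : ¬ lo < hi := by omega
    simp only [this, dif_neg, not_false_iff]
    omega
  | succ m ih =>
    intro lo hi h0 hlen hlo hhi
    rw [belowAux]
    by_cases h : lo < hi
    · simp only [h, dif_pos]
      have hmidlt : (lo + hi) / 2 < hi := by omega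
      have hmidge : lo ≤ (lo + hi) / 2 := by omega
      have hmlen : (lo + hi) / 2 < s.length := by omega
      have hget : s.getD ((lo + hi) / 2) 0 = s[(lo + hi) / 2] := List.getD_eq_getElem s 0 hmlen
      by_cases hc : s[(lo + hi) / 2] < t
      · have hk : (lo + hi) / 2 < s.countP (fun x => decide (x < t)) :=
          (prefix_lt s t hs _ hmlen).mp hc
        rw [hget, if_pos hc]
        exact ih ((lo + hi) / 2 + 1) hi (by omega) hlen (by omega) hhi
      · have hk : ¬ ((lo + hi) / 2 < s.countP (fun x => decide (x < t))) := by
          intro hcon; exact hc ((prefix_lt s t hs _ hmlen).mpr hcon)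
        rw [hget, if_neg hc]
        exact ih lo ((lo + hi) / 2) (by omega) (by omega) hlo (by omega)
    · simp only [h, dif_neg, not_false_iff]
      omega

-- countP (· < v+1) = countP (· < v) + count v, over Int.
lemma countP_succ (s : List Int) (v : Int) :
    s.countP (fun x => decide (x < v + 1))
      = s.countP (fun x => decide (x < v)) + s.count v := by
  induction s with
  | nil => simp
  | cons a tl ih =>
    rw [List.countP_cons, List.countP_cons, List.count_cons, ih]
    simp only [decide_eq_true_eq, beq_iff_eq]
    split_ifs <;> omega

-- Source B's below(v+1) - below(v) over the sorted copy equals arr.count v.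
lemma below_count (arr : List Int) (v : Int) :
    ((belowAux (PySem.List.sorted arr (fun x => x) false) (v + 1) 0
        (PySem.List.sorted arr (fun x => x) false).length : Int)
      - (belowAux (PySem.List.sorted arr (fun x => x) false) v 0
        (PySem.List.sorted arr (fun x => x) false).length : Int))
      = (arr.count v : Int) := by
  set s := PySem.List.sorted arr (fun x => x) false with hsdef
  have hs : s.Pairwise (· ≤ ·) := PySem.List.sorted_pairwise arr (fun x => x)
  have hperm : s.Perm arr := PySem.List.sorted_perm arr (fun x => x) false
  have hb1 : belowAux s (v + 1) 0 s.length = s.countP (fun x => decide (x < v + 1)) :=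
    belowAux_eq s (v + 1) hs s.length 0 s.length (by omega) le_rfl (Nat.zero_le _)
      List.countP_le_length
  have hb2 : belowAux s v 0 s.length = s.countP (fun x => decide (x < v)) :=
    belowAux_eq s v hs s.length 0 s.length (by omega) le_rfl (Nat.zero_le _)
      List.countP_le_length
  rw [hb1, hb2, countP_succ, hperm.countP_eq, hperm.count_eq]
  push_cast
  ring

-- ===== VERDICT (by name: the statement is the Claim_ definition above) =====
theorem solution_spec : Claim_equal_solution := by
  intro arr _
  unfold Spec_solution solution solution_alt
  simp only [fold_counts, zero_add, List.map_cons, List.map_nil, below_count]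
  rw [fill_eq]
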